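-- pv_equiv track=rewrite | github.com/Gellifree/CTable | main.py | distanceCheck
-- ===== SOURCE A (Python) =====
-- def distanceCheck(text,char,distance):
--     distanceList = []
--     lessons = ""
--     for i in range(len(text)):
--         if(text[i] != char):
--             lessons += text[i]
--         if(text[i] == char):
--             distanceList.append(len(lessons))
--             lessons = ""
--     distanceList.append(len(lessons))
--     for i in distanceList:
--         if(i != distance):
--             return False
--     return True
-- ===== SOURCE B (Python) =====
-- def distanceCheck(text, char, distance):
--     positions = [i for i in range(len(text)) if text[i] == char]
--     prev = -1
--     for idx in positions:
--         if idx - prev - 1 != distance: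
--             return False
--         prev = idx
--     return len(text) - prev - 1 == distance
-- ===== Notes on version B (the rewrite author's own statement) =====
-- stated objective: alternative
-- what changed: Instead of accumulating the non-matching characters into a string and collecting its lengths, B collects the match positions and derives each gap by index subtraction (idx - prev - 1), returning False early and checking the trailing gap arithmetically.
import Mathlib
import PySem

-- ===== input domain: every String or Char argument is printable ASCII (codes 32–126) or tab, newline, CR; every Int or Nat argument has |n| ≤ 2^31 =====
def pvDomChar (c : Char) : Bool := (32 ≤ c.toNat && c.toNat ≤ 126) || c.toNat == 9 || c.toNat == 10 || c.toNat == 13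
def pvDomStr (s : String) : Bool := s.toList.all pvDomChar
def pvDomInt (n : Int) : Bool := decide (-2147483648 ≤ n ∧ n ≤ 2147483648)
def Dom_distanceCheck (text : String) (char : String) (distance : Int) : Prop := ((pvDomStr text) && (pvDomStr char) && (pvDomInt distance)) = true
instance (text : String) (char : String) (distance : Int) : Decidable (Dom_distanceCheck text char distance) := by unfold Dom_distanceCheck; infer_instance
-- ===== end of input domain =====

-- B collects match positions and derives gaps by index subtraction instead of
-- accumulating a string of non-matching characters; alternative decomposition, same cost.


-- ===== PORT A =====
-- loop body: the two successive ifs of A (non-elif, conditions complementary)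
def pvStepA (char : String) (st : List Int × List Char) (c : Char) : List Int × List Char :=
  let st1 := if String.mk [c] != char then (st.1, st.2 ++ [c]) else st
  if String.mk [c] == char then (st1.1 ++ [(st1.2.length : Int)], []) else st1

def distanceCheck (text : String) (char : String) (distance : Int) : Bool :=
  let fin := text.toList.foldl (pvStepA char) ([], [])
  let distanceList := fin.1 ++ [(fin.2.length : Int)]
  -- early-return-False scan over distanceList
  distanceList.all (fun i => i == distance)

-- ===== PORT B =====
-- [i for i in range(len(text)) if text[i] == char], carrying the running index
def pvPositions (char : String) : List Char → Nat → List Int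
  | [], _ => []
  | c :: cs, j =>
    if String.mk [c] == char then (j : Int) :: pvPositions char cs (j + 1)
    else pvPositions char cs (j + 1)

-- the walk over positions with prev, early return False
def pvWalk (distance n : Int) : Int → List Int → Bool
  | prev, [] => n - prev - 1 == distance
  | prev, idx :: rest => if idx - prev - 1 != distance then false else pvWalk distance n idx rest

def distanceCheck_alt (text : String) (char : String) (distance : Int) : Bool :=
  pvWalk distance (text.toList.length : Int) (-1) (pvPositions char text.toList 0)

-- ===== PRECONDITION & SPEC =====
def Spec_distanceCheck (text : String) (char : String) (distance : Int) (out : Bool) : Prop := out = distanceCheck_alt text char distance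
instance (text : String) (char : String) (distance : Int) (out : Bool) : Decidable (Spec_distanceCheck text char distance out) := by unfold Spec_distanceCheck; infer_instance

-- ===== CLAIM (what is proved, stated in full; the proofs are below) =====
def Claim_equal_distanceCheck : Prop := ∀ (text : String) (char : String) (distance : Int), Dom_distanceCheck text char distance → Spec_distanceCheck text char distance (distanceCheck text char distance)

-- ===== LEMMAS AND PROOFS =====

-- common reference function: all gaps equal `distance`, k = length of current gap so far
def pvAllGaps (char : String) (distance : Int) : List Char → Nat → Bool
  | [], k => ((k : Int) == distance)
  | c :: cs, k =>
    if String.mk [c] == char then (((k : Int) == distance) && pvAllGaps char distance cs 0)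
    else pvAllGaps char distance cs (k + 1)

theorem pvFoldA_eq (char : String) (distance : Int) :
    ∀ (l : List Char) (dl : List Int) (ls : List Char),
      ((List.foldl (pvStepA char) (dl, ls) l).1
        ++ [((List.foldl (pvStepA char) (dl, ls) l).2.length : Int)]).all (fun i => i == distance)
      = (dl.all (fun i => i == distance) && pvAllGaps char distance l ls.length) := by
  intro l
  induction l with
  | nil => intro dl ls; simp [pvAllGaps]
  | cons c cs ih =>
    intro dl ls
    by_cases h : String.mk [c] == char
    · simp only [List.foldl_cons, pvStepA, h, bne_iff_ne, ne_eq, if_true]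
      simp only [beq_iff_eq] at h
      rw [if_neg (by simp [h])]
      rw [ih]
      simp [pvAllGaps, h, Bool.and_assoc]
    · have h' : String.mk [c] ≠ char := by simpa using h
      rw [show List.foldl (pvStepA char) (dl, ls) (c :: cs)
            = List.foldl (pvStepA char) (dl, ls ++ [c]) cs by
          simp [pvStepA, h']]
      rw [ih]
      simp [pvAllGaps, h']

theorem pvWalk_eq (char : String) (distance : Int) :
    ∀ (l : List Char) (j k : Nat) (prev : Int), (j : Int) - prev - 1 = (k : Int) →
      pvWalk distance ((j : Int) + l.length) prev (pvPositions char l j)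
      = pvAllGaps char distance l k := by
  intro l
  induction l with
  | nil =>
    intro j k prev h
    simp [pvPositions, pvWalk, pvAllGaps, h]
  | cons c cs ih =>
    intro j k prev h
    by_cases hc : String.mk [c] == char
    · simp only [pvPositions, hc, if_true, pvWalk, pvAllGaps, bne_iff_ne, ne_eq]
      have harith : ((j : Int) + (((c :: cs).length : Nat) : Int)) = ((j + 1 : Nat) : Int) + ((cs.length : Nat) : Int) := by
        push_cast [List.length_cons]; ring
      rw [harith, ih (j + 1) 0 (j : Int) (by push_cast; ring), h]
      by_cases hd : (k : Int) = distance
      · simp [hd]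
      · simp [hd]
    · rw [show pvPositions char (c :: cs) j = pvPositions char cs (j + 1) by
            simp [pvPositions, hc],
          show pvAllGaps char distance (c :: cs) k = pvAllGaps char distance cs (k + 1) by
            simp [pvAllGaps, hc]]
      have harith : ((j : Int) + (((c :: cs).length : Nat) : Int)) = ((j + 1 : Nat) : Int) + ((cs.length : Nat) : Int) := by
        push_cast [List.length_cons]; ring
      rw [harith, ih (j + 1) (k + 1) prev (by push_cast; omega)]

-- ===== VERDICT (by name: the statement is the Claim_ definition above) =====
theorem distanceCheck_spec : Claim_equal_distanceCheck := by
  intro text char distance _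
  show distanceCheck text char distance = distanceCheck_alt text char distance
  have hA := pvFoldA_eq char distance text.toList [] []
  have hB := pvWalk_eq char distance text.toList 0 0 (-1) (by norm_num)
  simp only [Nat.cast_zero, zero_add, List.length_nil, List.all_nil, Bool.true_and] at hA hB
  simp only [distanceCheck, distanceCheck_alt]
  rw [hB]
  exact hA
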